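-- pv_equiv track=rewrite | github.com/necksblkpg/backandfront | backend/analytics.py | _segment_customers
-- ===== SOURCE A (Python) =====
-- from typing import Dict, List, Any
--
-- def _segment_customers(customer_orders: Dict[str, List]) -> Dict[str, int]:
--     """Segmenterar kunder baserat på orderfrekvens"""
--     segments = {
--         "one_time": 0,
--         "occasional": 0,
--         "regular": 0,
--         "frequent": 0
--     }
--
--     for orders in customer_orders.values():
--         order_count = len(orders)
--         if order_count == 1:
--             segments["one_time"] += 1
--         elif order_count <= 3:
--             segments["occasional"] += 1
--         elif order_count <= 6:
--             segments["regular"] += 1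
--         else:
--             segments["frequent"] += 1
--
--     return segments
-- ===== SOURCE B (Python) =====
-- from typing import Dict, List, Any
--
-- def _segment_customers(customer_orders: Dict[str, List]) -> Dict[str, int]:
--     """Segmenterar kunder baserat pa orderfrekvens (staged closed-range counts, no mutated dict)."""
--     lens = [len(orders) for orders in customer_orders.values()]
--     one_time = sum(1 for n in lens if n == 1)
--     occasional = sum(1 for n in lens if n != 1 and n <= 3)
--     regular = sum(1 for n in lens if 3 < n <= 6)
--     frequent = len(lens) - one_time - occasional - regular
--     return {
--         "one_time": one_time,
--         "occasional": occasional,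
--         "regular": regular,
--         "frequent": frequent
--     }
-- ===== Notes on version B (the rewrite author's own statement) =====
-- stated objective: alternative
-- what changed: B never mutates a segments dict with per-customer branching: it extracts the list of order counts, computes three bucket totals by independent filtered counts over that list, derives the fourth as the complement (total minus the other three), and builds the result dict once from the four totals.
import Mathlib
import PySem

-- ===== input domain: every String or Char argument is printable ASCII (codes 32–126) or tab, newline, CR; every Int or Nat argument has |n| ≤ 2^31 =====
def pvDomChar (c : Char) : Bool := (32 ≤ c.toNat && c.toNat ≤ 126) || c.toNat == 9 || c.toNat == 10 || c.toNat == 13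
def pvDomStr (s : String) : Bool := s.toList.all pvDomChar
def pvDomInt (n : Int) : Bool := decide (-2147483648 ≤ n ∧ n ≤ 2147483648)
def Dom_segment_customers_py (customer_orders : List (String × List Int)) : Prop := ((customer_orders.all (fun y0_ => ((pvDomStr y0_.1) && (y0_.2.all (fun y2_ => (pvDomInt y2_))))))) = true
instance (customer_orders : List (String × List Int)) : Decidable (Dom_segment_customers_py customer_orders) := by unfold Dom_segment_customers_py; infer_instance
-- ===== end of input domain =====

-- B replaces A's mutated segments dict and per-customer branching by independent filtered
-- counts over the list of order counts, with the last bucket as complement (objective: alternative).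

-- ===== PORT A =====
-- Literal port of _segment_customers: a four-key dict, one threshold branch per customer.
-- `segments["k"] += 1` is exact as `modify "k" 0 (· + 1)` since the key is always present.
def segment_customers_py (customer_orders : List (String × List Int)) : List (String × Int) :=
  let segments : PySem.Dict String Int :=
    PySem.Dict.ofList [("one_time", 0), ("occasional", 0), ("regular", 0), ("frequent", 0)]
  let segments := customer_orders.foldl (fun seg kv =>
    let order_count : Int := kv.2.length
    if order_count = 1 then seg.modify "one_time" 0 (· + 1)
    else if order_count ≤ 3 then seg.modify "occasional" 0 (· + 1)
    else if order_count ≤ 6 then seg.modify "regular" 0 (· + 1)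
    else seg.modify "frequent" 0 (· + 1)) segments
  segments.items

-- ===== PORT B =====
-- Literal port of Source B: the list of order counts, three filtered counts
-- (sum(1 for n in lens if …) = countP), the fourth bucket as the complement,
-- and the result list built once at the end.
def segment_customers_py_alt (customer_orders : List (String × List Int)) : List (String × Int) :=
  let lens : List Int := customer_orders.map (fun kv => (kv.2.length : Int))
  let one_time : Int := (lens.countP (fun n => decide (n = 1)) : Int)
  let occasional : Int := (lens.countP (fun n => !decide (n = 1) && decide (n ≤ 3)) : Int)
  let regular : Int := (lens.countP (fun n => decide (3 < n) && decide (n ≤ 6)) : Int)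
  let frequent : Int := (lens.length : Int) - one_time - occasional - regular
  [("one_time", one_time), ("occasional", occasional), ("regular", regular), ("frequent", frequent)]

-- ===== PRECONDITION & SPEC =====
def Spec_segment_customers_py (customer_orders : List (String × List Int)) (out : List (String × Int)) : Prop := out = segment_customers_py_alt customer_orders
instance (customer_orders : List (String × List Int)) (out : List (String × Int)) : Decidable (Spec_segment_customers_py customer_orders out) := by unfold Spec_segment_customers_py; infer_instance

-- ===== CLAIM (what is proved, stated in full; the proofs are below) =====
def Claim_equal_segment_customers_py : Prop := ∀ (customer_orders : List (String × List Int)), Dom_segment_customers_py customer_orders → Spec_segment_customers_py customer_orders (segment_customers_py customer_orders)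

-- ===== LEMMAS AND PROOFS =====

-- the four (disjoint, exhaustive) bucket predicates on an order count
def pvQ1 (n : Int) : Bool := decide (n = 1)
def pvQ2 (n : Int) : Bool := !decide (n = 1) && decide (n ≤ 3)
def pvQ3 (n : Int) : Bool := !decide (n = 1) && !decide (n ≤ 3) && decide (n ≤ 6)
def pvQ4 (n : Int) : Bool := !decide (n = 1) && !decide (n ≤ 3) && !decide (n ≤ 6)

-- the list of order counts, one per customer
def pvLens (l : List (String × List Int)) : List Int := l.map (fun kv => (kv.2.length : Int))

-- A's loop characterised: each bucket accumulates the number of customers falling in it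
lemma pv_loopA (l : List (String × List Int)) : ∀ a b c d : Int,
    l.foldl (fun seg kv =>
      if (kv.2.length : Int) = 1 then seg.modify "one_time" 0 (· + 1)
      else if (kv.2.length : Int) ≤ 3 then seg.modify "occasional" 0 (· + 1)
      else if (kv.2.length : Int) ≤ 6 then seg.modify "regular" 0 (· + 1)
      else seg.modify "frequent" 0 (· + 1))
      (PySem.Dict.mk [("one_time", a), ("occasional", b), ("regular", c), ("frequent", d)])
    = PySem.Dict.mk [("one_time", a + ((pvLens l).countP pvQ1 : Int)),
        ("occasional", b + ((pvLens l).countP pvQ2 : Int)),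
        ("regular", c + ((pvLens l).countP pvQ3 : Int)),
        ("frequent", d + ((pvLens l).countP pvQ4 : Int))] := by
  induction l with
  | nil => intro a b c d; simp [pvLens]
  | cons x xs ih =>
    intro a b c d
    simp only [List.foldl_cons]
    by_cases h1 : (x.2.length : Int) = 1
    · rw [if_pos h1,
        show (PySem.Dict.mk [("one_time", a), ("occasional", b), ("regular", c), ("frequent", d)]).modify "one_time" 0 (· + 1)
          = PySem.Dict.mk [("one_time", a + 1), ("occasional", b), ("regular", c), ("frequent", d)] from rfl,
        ih]
      simp [pvLens, pvQ1, pvQ2, pvQ3, pvQ4, h1]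
      ring
    · by_cases h2 : (x.2.length : Int) ≤ 3
      · rw [if_neg h1, if_pos h2,
          show (PySem.Dict.mk [("one_time", a), ("occasional", b), ("regular", c), ("frequent", d)]).modify "occasional" 0 (· + 1)
            = PySem.Dict.mk [("one_time", a), ("occasional", b + 1), ("regular", c), ("frequent", d)] from rfl,
          ih]
        simp [pvLens, pvQ1, pvQ2, pvQ3, pvQ4, h1, h2]
        ring
      · by_cases h3 : (x.2.length : Int) ≤ 6
        · rw [if_neg h1, if_neg h2, if_pos h3,
            show (PySem.Dict.mk [("one_time", a), ("occasional", b), ("regular", c), ("frequent", d)]).modify "regular" 0 (· + 1)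
              = PySem.Dict.mk [("one_time", a), ("occasional", b), ("regular", c + 1), ("frequent", d)] from rfl,
            ih]
          simp [pvLens, pvQ1, pvQ2, pvQ3, pvQ4, h1, h2, h3]
          ring
        · rw [if_neg h1, if_neg h2, if_neg h3,
            show (PySem.Dict.mk [("one_time", a), ("occasional", b), ("regular", c), ("frequent", d)]).modify "frequent" 0 (· + 1)
              = PySem.Dict.mk [("one_time", a), ("occasional", b), ("regular", c), ("frequent", d + 1)] from rfl,
            ih]
          simp [pvLens, pvQ1, pvQ2, pvQ3, pvQ4, h1, h2, h3]
          ring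

-- B's third filter (3 < n ≤ 6) is A's third branch condition
lemma pv_q3_eq (xs : List Int) :
    xs.countP (fun n => decide (3 < n) && decide (n ≤ 6)) = xs.countP pvQ3 := by
  apply List.countP_congr
  intro n _
  simp only [pvQ3]
  by_cases h1 : n = 1 <;> by_cases h2 : n ≤ 3 <;> by_cases h3 : (3:Int) < n <;>
    simp [h1, h2, h3] <;> omega

-- the four buckets partition the list
lemma pv_sum (xs : List Int) :
    xs.countP pvQ1 + xs.countP pvQ2 + xs.countP pvQ3 + xs.countP pvQ4 = xs.length := by
  induction xs with
  | nil => simp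
  | cons x xs ih =>
    simp only [List.countP_cons, List.length_cons]
    by_cases h1 : x = 1 <;> by_cases h2 : x ≤ 3 <;> by_cases h3 : x ≤ 6 <;>
      simp [pvQ1, pvQ2, pvQ3, pvQ4, h1, h2, h3] <;> omega

-- ===== VERDICT (by name: the statement is the Claim_ definition above) =====
theorem segment_customers_py_spec : Claim_equal_segment_customers_py := by
  intro co _
  simp only [Spec_segment_customers_py, segment_customers_py, segment_customers_py_alt]
  rw [show (PySem.Dict.ofList [("one_time", (0:Int)), ("occasional", 0), ("regular", 0), ("frequent", 0)])
      = PySem.Dict.mk [("one_time", 0), ("occasional", 0), ("regular", 0), ("frequent", 0)] from rfl,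
    pv_loopA]
  have hs := pv_sum (pvLens co)
  have hl : (pvLens co).length = co.length := by simp [pvLens]
  rw [pv_q3_eq]
  have h4 : (0 : Int) + ((pvLens co).countP pvQ4 : Int)
      = ((pvLens co).length : Int) - ((pvLens co).countP pvQ1 : Int)
        - ((pvLens co).countP pvQ2 : Int) - ((pvLens co).countP pvQ3 : Int) := by omega
  rw [h4]
  simp [pvLens, Function.comp_def, pvQ1, pvQ2]
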